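-- pv_equiv track=rewrite | github.com/kr3shna/FraudX | backend/app/engine/ring_merger.py | _classify_pattern_type
-- ===== SOURCE A (Python) =====
-- _VELOCITY_PATTERNS = {"burst_activity", "high_velocity", "velocity_spike", "dormancy_break"}
--
-- def _classify_pattern_type(patterns: set[str]) -> str:
--     has_cycle = any(p.startswith("cycle_") for p in patterns)
--     has_smurfing = any(p.startswith("smurfing_") for p in patterns)
--     has_shell = any(p.startswith("shell_") for p in patterns)
--     has_velocity = bool(patterns & _VELOCITY_PATTERNS)
--
--     active = sum([has_cycle, has_smurfing, has_shell, has_velocity])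
--     if active > 1:
--         return "mixed"
--     if has_cycle:
--         return "cycle"
--     if has_smurfing:
--         return "smurfing"
--     if has_shell:
--         return "shell"
--     if has_velocity:
--         return "velocity"
--     return "unknown"
-- ===== SOURCE B (Python) =====
-- _VELOCITY_PATTERNS = {"burst_activity", "high_velocity", "velocity_spike", "dormancy_break"}
--
--
-- def _classify_pattern_type(patterns: set[str]) -> str:
--     cats = set()
--     for p in patterns:
--         if p.startswith("cycle_"):
--             cats.add("cycle")
--         elif p.startswith("smurfing_"):
--             cats.add("smurfing")
--         elif p.startswith("shell_"):
--             cats.add("shell")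
--         elif p in _VELOCITY_PATTERNS:
--             cats.add("velocity")
--     if len(cats) > 1:
--         return "mixed"
--     if cats:
--         return cats.pop()
--     return "unknown"
-- ===== Notes on version B (the rewrite author's own statement) =====
-- stated objective: alternative
-- what changed: Replaces four separate full scans plus a flag-count decision chain with a single pass that maps each pattern to at most one category into a set, then decides from the set's size and its sole element.
import Mathlib
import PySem

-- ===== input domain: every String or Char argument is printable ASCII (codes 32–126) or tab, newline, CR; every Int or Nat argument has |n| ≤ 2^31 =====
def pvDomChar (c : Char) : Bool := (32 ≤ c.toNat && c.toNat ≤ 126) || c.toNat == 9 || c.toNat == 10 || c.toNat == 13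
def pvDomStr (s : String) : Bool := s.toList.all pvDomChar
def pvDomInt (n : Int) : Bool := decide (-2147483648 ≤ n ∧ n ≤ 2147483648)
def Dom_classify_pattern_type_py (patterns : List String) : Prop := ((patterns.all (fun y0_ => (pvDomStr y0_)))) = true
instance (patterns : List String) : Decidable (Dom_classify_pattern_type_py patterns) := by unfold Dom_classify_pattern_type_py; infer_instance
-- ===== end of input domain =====

-- B replaces A's four full scans and flag-count chain by one pass building a category set, then a size-based decision.


-- ===== PORT A =====
-- module constant _VELOCITY_PATTERNS (a Python set, here its distinct elements)
def pvVelocity : PySem.Set String :=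
  ["burst_activity", "high_velocity", "velocity_spike", "dormancy_break"]

def classify_pattern_type_py (patterns : List String) : String :=
  let has_cycle := patterns.any (fun p => PySem.Str.startswith p "cycle_")
  let has_smurfing := patterns.any (fun p => PySem.Str.startswith p "smurfing_")
  let has_shell := patterns.any (fun p => PySem.Str.startswith p "shell_")
  let has_velocity := !(PySem.Set.inter (PySem.Set.ofList patterns) pvVelocity).isEmpty
  let active : Int := (if has_cycle then 1 else 0) + (if has_smurfing then 1 else 0)
    + (if has_shell then 1 else 0) + (if has_velocity then 1 else 0)
  if active > 1 then "mixed"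
  else if has_cycle then "cycle"
  else if has_smurfing then "smurfing"
  else if has_shell then "shell"
  else if has_velocity then "velocity"
  else "unknown"

-- ===== PORT B =====
-- the category (if any) a single pattern contributes, as in B's if/elif chain
def pvCat? (p : String) : Option String :=
  if PySem.Str.startswith p "cycle_" then some "cycle"
  else if PySem.Str.startswith p "smurfing_" then some "smurfing"
  else if PySem.Str.startswith p "shell_" then some "shell"
  else if PySem.Set.contains pvVelocity p then some "velocity"
  else none

-- one loop iteration of B: add the pattern's category (if any) to the set
def pvStep (s : PySem.Set String) (p : String) : PySem.Set String :=
  match pvCat? p with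
  | some c => PySem.Set.add s c
  | none => s

def classify_pattern_type_py_alt (patterns : List String) : String :=
  let cats : PySem.Set String := patterns.foldl pvStep PySem.Set.empty
  if 1 < cats.length then "mixed"
  else
    match cats with
    | [c] => c
    | _ => "unknown"

-- ===== PRECONDITION & SPEC =====
def Spec_classify_pattern_type_py (patterns : List String) (out : String) : Prop := out = classify_pattern_type_py_alt patterns
instance (patterns : List String) (out : String) : Decidable (Spec_classify_pattern_type_py patterns out) := by unfold Spec_classify_pattern_type_py; infer_instance

-- ===== CLAIM (what is proved, stated in full; the proofs are below) =====
def Claim_equal_classify_pattern_type_py : Prop := ∀ (patterns : List String), Dom_classify_pattern_type_py patterns → Spec_classify_pattern_type_py patterns (classify_pattern_type_py patterns)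

-- ===== LEMMAS AND PROOFS =====

-- membership in B's accumulated category set
theorem pvStep_mem (s : PySem.Set String) (p c : String) :
    c ∈ pvStep s p ↔ c ∈ s ∨ pvCat? p = some c := by
  unfold pvStep
  cases h : pvCat? p with
  | none => simp
  | some c' => rw [PySem.Set.mem_add]; simp [eq_comm]

theorem pvStep_nodup (s : PySem.Set String) (p : String) (hs : s.Nodup) :
    (pvStep s p).Nodup := by
  unfold pvStep
  cases pvCat? p with
  | none => exact hs
  | some c' => exact PySem.Set.nodup_add s c' hs

theorem mem_foldl_pvStep (l : List String) (s : PySem.Set String) (c : String) :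
    c ∈ l.foldl pvStep s ↔ c ∈ s ∨ ∃ p ∈ l, pvCat? p = some c := by
  induction l generalizing s with
  | nil => simp
  | cons a t ih =>
      rw [List.foldl_cons, ih, pvStep_mem]
      constructor
      · rintro ((hs | hc) | ⟨p, hp, hc⟩)
        · exact Or.inl hs
        · exact Or.inr ⟨a, List.mem_cons_self .., hc⟩
        · exact Or.inr ⟨p, List.mem_cons_of_mem _ hp, hc⟩
      · rintro (hs | ⟨p, hp, hc⟩)
        · exact Or.inl (Or.inl hs)
        · rcases List.mem_cons.1 hp with rfl | hp
          · exact Or.inl (Or.inr hc)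
          · exact Or.inr ⟨p, hp, hc⟩

theorem nodup_foldl_pvStep (l : List String) (s : PySem.Set String) (hs : s.Nodup) :
    (l.foldl pvStep s).Nodup := by
  induction l generalizing s with
  | nil => exact hs
  | cons a t ih => exact ih _ (pvStep_nodup s a hs)

-- a string cannot start with two incomparable prefixes
theorem not_startswith_both (p a b : String)
    (hab : ¬ a.toList <+: b.toList) (hba : ¬ b.toList <+: a.toList)
    (ha : PySem.Str.startswith p a = true) : PySem.Str.startswith p b = false := by
  by_contra h
  rw [Bool.not_eq_false] at h
  rw [PySem.Str.startswith_eq, PySem.Chars.startswith_iff] at ha h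
  rcases Nat.le_total a.toList.length b.toList.length with hl | hl
  · exact hab (List.prefix_of_prefix_length_le ha h hl)
  · exact hba (List.prefix_of_prefix_length_le h ha hl)

theorem cat_cycle (p : String) :
    pvCat? p = some "cycle" ↔ PySem.Str.startswith p "cycle_" = true := by
  constructor
  · intro h; unfold pvCat? at h; split_ifs at h <;> simp_all
  · intro h; simp_all [pvCat?]

theorem cat_smurfing (p : String) :
    pvCat? p = some "smurfing" ↔ PySem.Str.startswith p "smurfing_" = true := by
  constructor
  · intro h; unfold pvCat? at h; split_ifs at h <;> simp_all
  · intro h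
    have h1 : PySem.Str.startswith p "cycle_" = false :=
      not_startswith_both p "smurfing_" "cycle_" (by decide) (by decide) h
    simp_all [pvCat?]

theorem cat_shell (p : String) :
    pvCat? p = some "shell" ↔ PySem.Str.startswith p "shell_" = true := by
  constructor
  · intro h; unfold pvCat? at h; split_ifs at h <;> simp_all
  · intro h
    have h1 : PySem.Str.startswith p "cycle_" = false :=
      not_startswith_both p "shell_" "cycle_" (by decide) (by decide) h
    have h2 : PySem.Str.startswith p "smurfing_" = false :=
      not_startswith_both p "shell_" "smurfing_" (by decide) (by decide) h
    simp_all [pvCat?]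

theorem cat_velocity (p : String) :
    pvCat? p = some "velocity" ↔ p ∈ pvVelocity := by
  constructor
  · intro h; unfold pvCat? at h; split_ifs at h with h1 h2 h3 h4 <;> simp_all
  · intro h
    have h4 : p = "burst_activity" ∨ p = "high_velocity" ∨ p = "velocity_spike"
        ∨ p = "dormancy_break" := by simpa [pvVelocity] using h
    rcases h4 with rfl | rfl | rfl | rfl <;> decide

theorem cat_range (p c : String) (h : pvCat? p = some c) :
    c = "cycle" ∨ c = "smurfing" ∨ c = "shell" ∨ c = "velocity" := by
  unfold pvCat? at h
  split_ifs at h <;> simp_all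

-- list helper: two distinct members force length > 1
theorem one_lt_length_of_two_mem {α : Type} {l : List α} {a b : α}
    (ha : a ∈ l) (hb : b ∈ l) (hne : a ≠ b) : 1 < l.length := by
  match l with
  | [] => cases ha
  | [x] =>
      simp only [List.mem_singleton] at ha hb
      exact absurd (ha.trans hb.symm) hne
  | x :: y :: t => simp only [List.length_cons]; omega

-- list helper: a nodup list whose members are all x, containing x, is [x]
theorem eq_singleton_of_mem {α : Type} {l : List α} {x : α}
    (hx : x ∈ l) (hall : ∀ c ∈ l, c = x) (hnd : l.Nodup) : l = [x] := by
  match l with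
  | [] => cases hx
  | a :: t =>
      have hax : a = x := hall a (List.mem_cons_self ..)
      subst hax
      cases t with
      | nil => rfl
      | cons b u =>
          have hb : b = a := (hall b (by simp)).trans (hall a (by simp)).symm
          exact absurd (hb ▸ (List.mem_cons_self : b ∈ b :: u) : a ∈ b :: u)
            (List.nodup_cons.1 hnd).1

theorem eq_nil_of_no_mem {α : Type} {l : List α} (h : ∀ c, c ∉ l) : l = [] := by
  cases l with
  | nil => rfl
  | cons a t => exact absurd (List.mem_cons_self ..) (h a)

-- ===== VERDICT (by name: the statement is the Claim_ definition above) =====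
theorem classify_pattern_type_py_spec : Claim_equal_classify_pattern_type_py := by
  intro patterns _
  unfold Spec_classify_pattern_type_py classify_pattern_type_py classify_pattern_type_py_alt
  set cats := patterns.foldl pvStep PySem.Set.empty with hcats
  have hmem : ∀ c, c ∈ cats ↔ ∃ p ∈ patterns, pvCat? p = some c := by
    intro c; rw [hcats, mem_foldl_pvStep]; simp [PySem.Set.empty]
  have hnd : cats.Nodup := nodup_foldl_pvStep _ _ (by simp [PySem.Set.empty])
  have hrange : ∀ c ∈ cats, c = "cycle" ∨ c = "smurfing" ∨ c = "shell" ∨ c = "velocity" := by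
    intro c hc
    rcases (hmem c).1 hc with ⟨p, _, hp⟩
    exact cat_range p c hp
  have hC : "cycle" ∈ cats ↔ patterns.any (fun p => PySem.Str.startswith p "cycle_") = true := by
    rw [hmem, List.any_eq_true]
    exact exists_congr fun p => and_congr_right fun _ => cat_cycle p
  have hS : "smurfing" ∈ cats ↔ patterns.any (fun p => PySem.Str.startswith p "smurfing_") = true := by
    rw [hmem, List.any_eq_true]
    exact exists_congr fun p => and_congr_right fun _ => cat_smurfing p
  have hH : "shell" ∈ cats ↔ patterns.any (fun p => PySem.Str.startswith p "shell_") = true := by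
    rw [hmem, List.any_eq_true]
    exact exists_congr fun p => and_congr_right fun _ => cat_shell p
  have hV : "velocity" ∈ cats ↔
      (!(PySem.Set.inter (PySem.Set.ofList patterns) pvVelocity).isEmpty) = true := by
    rw [hmem]
    have hbool : ∀ (l : List String), ((!l.isEmpty) = true) ↔ ∃ x, x ∈ l := by
      intro l; cases l <;> simp
    rw [hbool]
    constructor
    · rintro ⟨p, hp, hc⟩
      refine ⟨p, ?_⟩
      rw [PySem.Set.mem_inter, PySem.Set.mem_ofList]
      exact ⟨hp, (cat_velocity p).1 hc⟩
    · rintro ⟨p, hp⟩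
      rw [PySem.Set.mem_inter, PySem.Set.mem_ofList] at hp
      exact ⟨p, hp.1, (cat_velocity p).2 hp.2⟩
  cases fc : patterns.any (fun p => PySem.Str.startswith p "cycle_") <;>
  cases fs : patterns.any (fun p => PySem.Str.startswith p "smurfing_") <;>
  cases fh : patterns.any (fun p => PySem.Str.startswith p "shell_") <;>
  cases fv : (!(PySem.Set.inter (PySem.Set.ofList patterns) pvVelocity).isEmpty)
  · have hnil : cats = [] := eq_nil_of_no_mem fun c hc => by
      rcases hrange c hc with rfl | rfl | rfl | rfl
      · exact absurd (hC.1 hc) (by rw [fc]; exact Bool.false_ne_true)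
      · exact absurd (hS.1 hc) (by rw [fs]; exact Bool.false_ne_true)
      · exact absurd (hH.1 hc) (by rw [fh]; exact Bool.false_ne_true)
      · exact absurd (hV.1 hc) (by rw [fv]; exact Bool.false_ne_true)
    rw [hnil]
    simp
  · have hm : "velocity" ∈ cats := hV.2 fv
    have hall : ∀ c ∈ cats, c = "velocity" := by
      intro c hc
      rcases hrange c hc with rfl | rfl | rfl | rfl
      · exact absurd (hC.1 hc) (by rw [fc]; exact Bool.false_ne_true)
      · exact absurd (hS.1 hc) (by rw [fs]; exact Bool.false_ne_true)
      · exact absurd (hH.1 hc) (by rw [fh]; exact Bool.false_ne_true)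
      · rfl
    rw [eq_singleton_of_mem hm hall hnd]
    simp
  · have hm : "shell" ∈ cats := hH.2 fh
    have hall : ∀ c ∈ cats, c = "shell" := by
      intro c hc
      rcases hrange c hc with rfl | rfl | rfl | rfl
      · exact absurd (hC.1 hc) (by rw [fc]; exact Bool.false_ne_true)
      · exact absurd (hS.1 hc) (by rw [fs]; exact Bool.false_ne_true)
      · rfl
      · exact absurd (hV.1 hc) (by rw [fv]; exact Bool.false_ne_true)
    rw [eq_singleton_of_mem hm hall hnd]
    simp
  · have h2 : 1 < cats.length := one_lt_length_of_two_mem (hH.2 fh) (hV.2 fv) (by decide)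
    simp [h2]
  · have hm : "smurfing" ∈ cats := hS.2 fs
    have hall : ∀ c ∈ cats, c = "smurfing" := by
      intro c hc
      rcases hrange c hc with rfl | rfl | rfl | rfl
      · exact absurd (hC.1 hc) (by rw [fc]; exact Bool.false_ne_true)
      · rfl
      · exact absurd (hH.1 hc) (by rw [fh]; exact Bool.false_ne_true)
      · exact absurd (hV.1 hc) (by rw [fv]; exact Bool.false_ne_true)
    rw [eq_singleton_of_mem hm hall hnd]
    simp
  · have h2 : 1 < cats.length := one_lt_length_of_two_mem (hS.2 fs) (hV.2 fv) (by decide)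
    simp [h2]
  · have h2 : 1 < cats.length := one_lt_length_of_two_mem (hS.2 fs) (hH.2 fh) (by decide)
    simp [h2]
  · have h2 : 1 < cats.length := one_lt_length_of_two_mem (hS.2 fs) (hH.2 fh) (by decide)
    simp [h2]
  · have hm : "cycle" ∈ cats := hC.2 fc
    have hall : ∀ c ∈ cats, c = "cycle" := by
      intro c hc
      rcases hrange c hc with rfl | rfl | rfl | rfl
      · rfl
      · exact absurd (hS.1 hc) (by rw [fs]; exact Bool.false_ne_true)
      · exact absurd (hH.1 hc) (by rw [fh]; exact Bool.false_ne_true)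
      · exact absurd (hV.1 hc) (by rw [fv]; exact Bool.false_ne_true)
    rw [eq_singleton_of_mem hm hall hnd]
    simp
  · have h2 : 1 < cats.length := one_lt_length_of_two_mem (hC.2 fc) (hV.2 fv) (by decide)
    simp [h2]
  · have h2 : 1 < cats.length := one_lt_length_of_two_mem (hC.2 fc) (hH.2 fh) (by decide)
    simp [h2]
  · have h2 : 1 < cats.length := one_lt_length_of_two_mem (hC.2 fc) (hH.2 fh) (by decide)
    simp [h2]
  · have h2 : 1 < cats.length := one_lt_length_of_two_mem (hC.2 fc) (hS.2 fs) (by decide)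
    simp [h2]
  · have h2 : 1 < cats.length := one_lt_length_of_two_mem (hC.2 fc) (hS.2 fs) (by decide)
    simp [h2]
  · have h2 : 1 < cats.length := one_lt_length_of_two_mem (hC.2 fc) (hS.2 fs) (by decide)
    simp [h2]
  · have h2 : 1 < cats.length := one_lt_length_of_two_mem (hC.2 fc) (hS.2 fs) (by decide)
    simp [h2]
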